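-- pv_equiv track=rewrite | github.com/leowucn/captain | src/learn_english/model/extract.py | get_backward_content
-- ===== SOURCE A (Python) =====
-- def get_backward_content(paragraph):
--     """ extract the content from paragraph between
--      the head of paragraph or the index of symbols
--       like '.', '!' which appear. """
--     res = []
--     for i, c in enumerate(paragraph[::-1]):
--         if i < 80:
--             res.append(c)
--             continue
--         if c == '.' or c == '!' or c == '?':
--             break
--         res.append(c)
--     return ''.join(res)[::-1]
-- ===== SOURCE B (Python) =====
-- def get_backward_content(paragraph):
--     """ extract the content from paragraph between
--      the head of paragraph or the index of symbols
--       like '.', '!' which appear. """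
--     region = paragraph[:max(0, len(paragraph) - 80)]
--     idx = max(region.rfind('.'), region.rfind('!'), region.rfind('?'))
--     return paragraph[idx + 1:]
-- ===== Notes on version B (the rewrite author's own statement) =====
-- stated objective: faster
-- what changed: Instead of reversing the string and rebuilding it char-by-char in a Python loop with continue/break, B locates the last sentence terminator in paragraph[:max(0,len-80)] via three builtin rfind calls and returns a single slice paragraph[idx+1:].
import Mathlib
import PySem

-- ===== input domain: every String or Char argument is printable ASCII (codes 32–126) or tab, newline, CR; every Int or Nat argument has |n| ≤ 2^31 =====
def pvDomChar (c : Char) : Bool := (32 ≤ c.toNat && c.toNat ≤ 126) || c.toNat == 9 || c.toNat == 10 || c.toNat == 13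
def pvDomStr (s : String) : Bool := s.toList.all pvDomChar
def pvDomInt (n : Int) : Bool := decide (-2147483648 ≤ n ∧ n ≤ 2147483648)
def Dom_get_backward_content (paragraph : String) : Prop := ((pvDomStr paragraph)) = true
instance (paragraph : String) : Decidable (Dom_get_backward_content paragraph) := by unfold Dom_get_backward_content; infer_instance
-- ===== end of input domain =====

-- B replaces A's per-char reverse-and-rebuild loop by three builtin rfind calls on paragraph[:max(0,len-80)] and one slice; same result, measured constant-factor faster.

-- ===== PORT A =====
-- the for-loop over enumerate(paragraph[::-1]) with `continue`/`break`, as structural recursion;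
-- paragraph[::-1] is list reversal (PySem.List.slice?_none_none_neg_one)
def pvGbLoop (cs : List Char) (i : Nat) (res : List Char) : List Char :=
  match cs with
  | [] => res
  | c :: rest =>
    if i < 80 then pvGbLoop rest (i + 1) (res ++ [c])
    else if c == '.' || c == '!' || c == '?' then res
    else pvGbLoop rest (i + 1) (res ++ [c])

def get_backward_content (paragraph : String) : String :=
  String.ofList ((pvGbLoop paragraph.toList.reverse 0 []).reverse)

-- ===== PORT B =====
-- region.rfind(ch) for a ONE-CHAR needle, ported by hand: highest index of ch, or -1 (exact for single chars)
def pvRfindAux (ch : Char) : List Char → Option Nat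
  | [] => none
  | x :: xs =>
    match pvRfindAux ch xs with
    | some j => some (j + 1)
    | none => if x == ch then some 0 else none

def pvRfind (s : List Char) (ch : Char) : Int :=
  match pvRfindAux ch s with
  | some j => (j : Int)
  | none => -1

def get_backward_content_alt (paragraph : String) : String :=
  let l := paragraph.toList
  let region := l.take (l.length - 80)   -- paragraph[:max(0, len(paragraph) - 80)] (Nat subtraction clamps like max)
  let idx := max (max (pvRfind region '.') (pvRfind region '!')) (pvRfind region '?')
  String.ofList (l.drop (idx + 1).toNat)     -- paragraph[idx+1:] with idx+1 ≥ 0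

-- ===== PRECONDITION & SPEC =====
def Spec_get_backward_content (paragraph : String) (out : String) : Prop := out = get_backward_content_alt paragraph
instance (paragraph : String) (out : String) : Decidable (Spec_get_backward_content paragraph out) := by unfold Spec_get_backward_content; infer_instance

-- ===== CLAIM (what is proved, stated in full; the proofs are below) =====
def Claim_equal_get_backward_content : Prop := ∀ (paragraph : String), Dom_get_backward_content paragraph → Spec_get_backward_content paragraph (get_backward_content paragraph)

-- ===== LEMMAS AND PROOFS =====

def pvIsTerm (c : Char) : Bool := c == '.' || c == '!' || c == '?'

-- index of the last terminator, as an Int (-1 if none)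
def pvLastIdx : List Char → Int
  | [] => -1
  | x :: xs =>
    let j := pvLastIdx xs
    if 0 ≤ j then j + 1 else if pvIsTerm x then 0 else -1

theorem pvRfind_cons (x : Char) (xs : List Char) (ch : Char) :
    pvRfind (x :: xs) ch =
      if 0 ≤ pvRfind xs ch then pvRfind xs ch + 1 else if x == ch then 0 else -1 := by
  cases h : pvRfindAux ch xs with
  | none =>
    have hx : pvRfind xs ch = -1 := by simp [pvRfind, h]
    by_cases he : x == ch <;> simp [pvRfind, pvRfindAux, h, he]
  | some j =>
    have hx : pvRfind xs ch = (j : Int) := by simp [pvRfind, h]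
    simp [pvRfind, pvRfindAux, h]

theorem pvRfind_bounds (xs : List Char) (ch : Char) :
    -1 ≤ pvRfind xs ch ∧ pvRfind xs ch < xs.length := by
  induction xs with
  | nil => simp [pvRfind, pvRfindAux]
  | cons x xs ih =>
    obtain ⟨ih1, ih2⟩ := ih
    rw [pvRfind_cons]
    simp only [List.length_cons]
    push_cast
    split_ifs <;> omega

theorem pvLastIdx_bounds (xs : List Char) :
    -1 ≤ pvLastIdx xs ∧ pvLastIdx xs < xs.length := by
  induction xs with
  | nil => simp [pvLastIdx]
  | cons x xs ih =>
    obtain ⟨ih1, ih2⟩ := ih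
    simp only [pvLastIdx, List.length_cons]
    push_cast
    split_ifs <;> omega

theorem pvStep2 (a b : Int) (p q : Prop) [Decidable p] [Decidable q]
    (ha : -1 ≤ a) (hb : -1 ≤ b) :
    max (if 0 ≤ a then a + 1 else if p then 0 else -1)
        (if 0 ≤ b then b + 1 else if q then 0 else -1)
      = if 0 ≤ max a b then max a b + 1 else if p ∨ q then 0 else -1 := by
  simp only [Int.max_def]
  split_ifs <;> first | omega | tauto

theorem pvMax3_eq_lastIdx (xs : List Char) :
    max (max (pvRfind xs '.') (pvRfind xs '!')) (pvRfind xs '?') = pvLastIdx xs := by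
  induction xs with
  | nil => simp [pvRfind, pvRfindAux, pvLastIdx]
  | cons x xs ih =>
    have hd := (pvRfind_bounds xs '.').1
    have he := (pvRfind_bounds xs '!').1
    have hq := (pvRfind_bounds xs '?').1
    rw [pvRfind_cons, pvRfind_cons, pvRfind_cons,
      pvStep2 _ _ _ _ hd he, pvStep2 _ _ _ _ (le_max_of_le_left hd) hq, ih]
    simp only [pvLastIdx, pvIsTerm, Bool.or_eq_true, beq_iff_eq, or_assoc]

theorem pvLastIdx_append (ys : List Char) (x : Char) :
    pvLastIdx (ys ++ [x]) = if pvIsTerm x then (ys.length : Int) else pvLastIdx ys := by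
  induction ys with
  | nil => simp [pvLastIdx]
  | cons y ys ih =>
    have hb := (pvLastIdx_bounds ys).1
    simp only [List.cons_append, pvLastIdx, ih, List.length_cons]
    push_cast
    split_ifs <;> omega

theorem pvTakeWhile_reverse (g : List Char) :
    (g.reverse.takeWhile (fun c => !pvIsTerm c)).reverse = g.drop (pvLastIdx g + 1).toNat := by
  induction g using List.reverseRecOn with
  | nil => simp [pvLastIdx]
  | append_singleton ys x ih =>
    rw [pvLastIdx_append]
    by_cases h : pvIsTerm x
    · have hlen : ((ys.length : Int) + 1).toNat = ys.length + 1 := by omega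
      simp [h, List.reverse_append, hlen, List.drop_append]
    · have hb := (pvLastIdx_bounds ys).1
      have hlt := (pvLastIdx_bounds ys).2
      have ht : (pvLastIdx ys + 1).toNat ≤ ys.length := by omega
      have hz : (pvLastIdx ys + 1).toNat - ys.length = 0 := by omega
      rw [if_neg h, List.reverse_append]
      simp only [List.reverse_cons, List.reverse_nil, List.nil_append, List.singleton_append,
        List.takeWhile_cons, h, Bool.not_false, if_true, List.reverse_cons, ih,
        List.drop_append, hz, List.drop_zero]

theorem pvGbLoop_spec (cs : List Char) :
    ∀ (i : Nat) (res : List Char),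
      pvGbLoop cs i res =
        res ++ cs.take (80 - i) ++ (cs.drop (80 - i)).takeWhile (fun c => !pvIsTerm c) := by
  induction cs with
  | nil => intro i res; simp [pvGbLoop]
  | cons c rest ih =>
    intro i res
    by_cases h : i < 80
    · have h80 : 80 - i = (80 - (i + 1)) + 1 := by omega
      rw [pvGbLoop, if_pos h, ih, h80]
      simp [List.take_succ_cons, List.drop_succ_cons, List.append_assoc]
    · have h80 : 80 - i = 0 := by omega
      rw [pvGbLoop, if_neg h, h80]
      by_cases ht : pvIsTerm c
      · have : (c == '.' || c == '!' || c == '?') = true := ht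
        rw [if_pos this]
        simp [ht]
      · have : ¬ ((c == '.' || c == '!' || c == '?') = true) := ht
        rw [if_neg this, ih]
        have h80' : 80 - (i + 1) = 0 := by omega
        rw [h80']
        simp [ht]

-- ===== VERDICT (by name: the statement is the Claim_ definition above) =====
theorem get_backward_content_spec : Claim_equal_get_backward_content := by
  intro paragraph _
  show String.ofList ((pvGbLoop paragraph.toList.reverse 0 []).reverse)
      = String.ofList (paragraph.toList.drop
          ((max (max (pvRfind (paragraph.toList.take (paragraph.toList.length - 80)) '.')
                     (pvRfind (paragraph.toList.take (paragraph.toList.length - 80)) '!'))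
                (pvRfind (paragraph.toList.take (paragraph.toList.length - 80)) '?') + 1).toNat))
  set l := paragraph.toList with hl
  set g := l.take (l.length - 80) with hg
  rw [pvMax3_eq_lastIdx, pvGbLoop_spec]
  have hb := (pvLastIdx_bounds g).1
  have hlt := (pvLastIdx_bounds g).2
  have ht : (pvLastIdx g + 1).toNat ≤ g.length := by omega
  have hz : (pvLastIdx g + 1).toNat - g.length = 0 := by omega
  have hdrop : l.reverse.drop 80 = g.reverse := by rw [List.drop_reverse]
  have htake : (l.reverse.take 80).reverse = l.drop (l.length - 80) := by
    rw [List.take_reverse, List.reverse_reverse]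
  have hsplit : l = g ++ l.drop (l.length - 80) := by rw [hg, List.take_append_drop]
  simp only [Nat.sub_zero, List.nil_append, List.reverse_append]
  rw [hdrop, htake, pvTakeWhile_reverse]
  conv_rhs => rw [hsplit]
  rw [List.drop_append, hz, List.drop_zero]
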